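-- pv_equiv track=rewrite | github.com/sadevans/dataset_simulation | src/masks.py | check_valid_placement
-- ===== SOURCE A (Python) =====
-- def check_valid_placement(existing_figures, new_figure_coordinates):
--     for new_coord in new_figure_coordinates:
--         x, y = new_coord
--
--         # Проверка на пересечение или касание других фигур
--         for existing_figure in existing_figures:
--             if (x, y) in existing_figure:
--                 return False  # Фигура пересекается или касается другой
--
--         # Проверка расстояния от соседних фигур
--         for existing_figure in existing_figures:
--             for existing_coord in existing_figure:
--                 ex, ey = existing_coord
--                 if abs(x - ex) <= 1 and abs(y - ey) <= 1:
--                     return False  # Фигура находится на расстоянии <= 2 пикселей от соседних фигур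
--
--     return True
-- ===== SOURCE B (Python) =====
-- def check_valid_placement(existing_figures, new_figure_coordinates):
--     blocked = set()
--     for figure in existing_figures:
--         for ex, ey in figure:
--             for dx in (-1, 0, 1):
--                 for dy in (-1, 0, 1):
--                     blocked.add((ex + dx, ey + dy))
--     for x, y in new_figure_coordinates:
--         if (x, y) in blocked:
--             return False
--     return True
-- ===== Notes on version B (the rewrite author's own statement) =====
-- stated objective: faster
-- what changed: B precomputes one 'blocked' set of all existing cells dilated by their 9-cell Chebyshev neighborhoods, then checks each new coordinate with a single set lookup, instead of A's per-new-coordinate rescans of every existing coordinate (and its redundant separate membership pass).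
import Mathlib
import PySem

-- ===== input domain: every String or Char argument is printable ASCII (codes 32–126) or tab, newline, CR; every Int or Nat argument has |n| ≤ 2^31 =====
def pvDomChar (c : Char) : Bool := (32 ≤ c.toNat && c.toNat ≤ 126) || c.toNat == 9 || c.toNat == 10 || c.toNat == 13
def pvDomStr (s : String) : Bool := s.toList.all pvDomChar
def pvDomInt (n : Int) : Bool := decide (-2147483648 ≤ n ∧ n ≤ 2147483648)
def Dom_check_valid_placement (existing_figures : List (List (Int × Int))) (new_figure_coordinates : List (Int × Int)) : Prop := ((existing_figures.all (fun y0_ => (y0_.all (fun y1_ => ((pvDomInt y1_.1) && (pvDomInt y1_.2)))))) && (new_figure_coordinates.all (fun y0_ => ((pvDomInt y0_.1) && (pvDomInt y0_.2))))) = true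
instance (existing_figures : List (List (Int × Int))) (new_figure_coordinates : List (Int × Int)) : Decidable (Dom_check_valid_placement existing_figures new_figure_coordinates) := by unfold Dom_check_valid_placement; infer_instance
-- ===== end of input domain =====

-- B replaces A's per-new-coordinate rescans of all existing coordinates by one precomputed
-- 'blocked' set (every existing cell dilated by its 9-cell Chebyshev neighborhood) plus one
-- lookup per new coordinate (objective: faster, O(m+n) passes instead of O(n·m) rescans).

-- ===== PORT A =====
-- literal transliteration of A: outer loop over new coords with early 'return False' = List.all;
-- first pass: membership of (x,y) in some existing figure; second pass: Chebyshev distance ≤ 1.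
def check_valid_placement (existing_figures : List (List (Int × Int))) (new_figure_coordinates : List (Int × Int)) : Bool :=
  new_figure_coordinates.all (fun (⟨x, y⟩ : Int × Int) =>
    if existing_figures.any (fun existing_figure => existing_figure.contains (x, y)) then
      false
    else if existing_figures.any (fun existing_figure =>
        existing_figure.any (fun ec =>
          decide (|x - ec.1| ≤ 1) && decide (|y - ec.2| ≤ 1))) then
      false
    else
      true)

-- ===== PORT B =====
-- B's blocked set: fold over figures / coords / the two delta tuples, inserting with Set.add.
def pvBlocked (existing_figures : List (List (Int × Int))) : PySem.Set (Int × Int) :=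
  existing_figures.foldl (fun s figure =>
    figure.foldl (fun s ec =>
      ([-1, 0, 1] : List Int).foldl (fun s dx =>
        ([-1, 0, 1] : List Int).foldl (fun s dy =>
          PySem.Set.add s (ec.1 + dx, ec.2 + dy)) s) s) s) PySem.Set.empty

def check_valid_placement_alt (existing_figures : List (List (Int × Int))) (new_figure_coordinates : List (Int × Int)) : Bool :=
  let blocked := pvBlocked existing_figures
  new_figure_coordinates.all (fun c => !(PySem.Set.contains blocked (c.1, c.2)))

-- ===== PRECONDITION & SPEC =====
def Spec_check_valid_placement (existing_figures : List (List (Int × Int))) (new_figure_coordinates : List (Int × Int)) (out : Bool) : Prop := out = check_valid_placement_alt existing_figures new_figure_coordinates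
instance (existing_figures : List (List (Int × Int))) (new_figure_coordinates : List (Int × Int)) (out : Bool) : Decidable (Spec_check_valid_placement existing_figures new_figure_coordinates out) := by unfold Spec_check_valid_placement; infer_instance

-- ===== CLAIM (what is proved, stated in full; the proofs are below) =====
def Claim_equal_check_valid_placement : Prop := ∀ (existing_figures : List (List (Int × Int))) (new_figure_coordinates : List (Int × Int)), Dom_check_valid_placement existing_figures new_figure_coordinates → Spec_check_valid_placement existing_figures new_figure_coordinates (check_valid_placement existing_figures new_figure_coordinates)

-- ===== LEMMAS AND PROOFS =====

-- membership in a fold of Set.add's, given a membership characterisation of the step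
theorem pv_mem_foldl_step {β : Type} (Q : β → Int × Int → Prop)
    (g : PySem.Set (Int × Int) → β → PySem.Set (Int × Int))
    (hg : ∀ s x y, y ∈ g s x ↔ y ∈ s ∨ Q x y) :
    ∀ (xs : List β) (s : PySem.Set (Int × Int)) (y : Int × Int),
      y ∈ xs.foldl g s ↔ y ∈ s ∨ ∃ x ∈ xs, Q x y := by
  intro xs
  induction xs with
  | nil => simp
  | cons x xs ih =>
    intro s y
    simp only [List.foldl_cons, ih, hg, List.mem_cons]
    constructor
    · rintro ((h | h) | ⟨z, hz, hq⟩)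
      · exact Or.inl h
      · exact Or.inr ⟨x, Or.inl rfl, h⟩
      · exact Or.inr ⟨z, Or.inr hz, hq⟩
    · rintro (h | ⟨z, (rfl | hz), hq⟩)
      · exact Or.inl (Or.inl h)
      · exact Or.inl (Or.inr hq)
      · exact Or.inr ⟨z, hz, hq⟩

theorem pv_mem_blocked (existing_figures : List (List (Int × Int))) (y : Int × Int) :
    y ∈ pvBlocked existing_figures ↔
      ∃ fig ∈ existing_figures, ∃ ec ∈ fig, |y.1 - ec.1| ≤ 1 ∧ |y.2 - ec.2| ≤ 1 := by
  unfold pvBlocked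
  rw [pv_mem_foldl_step
    (Q := fun fig y => ∃ ec ∈ fig, ∃ dx ∈ ([-1,0,1] : List Int), ∃ dy ∈ ([-1,0,1] : List Int),
      y = (ec.1 + dx, ec.2 + dy))
    (hg := by
      intro s fig y
      rw [pv_mem_foldl_step
        (Q := fun ec y => ∃ dx ∈ ([-1,0,1] : List Int), ∃ dy ∈ ([-1,0,1] : List Int),
          y = (ec.1 + dx, ec.2 + dy))
        (hg := by
          intro s ec y
          rw [pv_mem_foldl_step
            (Q := fun dx y => ∃ dy ∈ ([-1,0,1] : List Int), y = (ec.1 + dx, ec.2 + dy))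
            (hg := by
              intro s dx y
              rw [pv_mem_foldl_step
                (Q := fun dy y => y = (ec.1 + dx, ec.2 + dy))
                (hg := by intro s dy y; simp [PySem.Set.mem_add])]
            )])])]
  have hempty : y ∉ (PySem.Set.empty : PySem.Set (Int × Int)) := by
    simp [PySem.Set.empty]
  constructor
  · rintro (h | ⟨fig, hfig, ec, hec, dx, hdx, dy, hdy, rfl⟩)
    · exact absurd h hempty
    · refine ⟨fig, hfig, ec, hec, ?_, ?_⟩ <;>
        (simp at hdx hdy; rcases hdx with rfl | rfl | rfl <;> rcases hdy with rfl | rfl | rfl <;> simp)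
  · rintro ⟨fig, hfig, ec, hec, h1, h2⟩
    rw [abs_le] at h1 h2
    refine Or.inr ⟨fig, hfig, ec, hec, y.1 - ec.1, ?_, y.2 - ec.2, ?_, ?_⟩
    · simp; omega
    · simp; omega
    · simp

-- ===== VERDICT (by name: the statement is the Claim_ definition above) =====
theorem check_valid_placement_spec : Claim_equal_check_valid_placement := by
  intro existing_figures new_figure_coordinates _
  unfold Spec_check_valid_placement check_valid_placement check_valid_placement_alt
  rw [Bool.eq_iff_iff, List.all_eq_true, List.all_eq_true]
  constructor <;> intro h nc hnc <;> have hA := h nc hnc <;> clear h <;> obtain ⟨x, y⟩ := nc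
  · -- A's body true → (x, y) ∉ blocked
    rw [Bool.not_eq_true']
    by_contra hcontr
    rw [Bool.not_eq_false, PySem.Set.contains_iff, pv_mem_blocked] at hcontr
    obtain ⟨fig, hfig, ec, hec, h1, h2⟩ := hcontr
    simp only at h1 h2
    dsimp only at hA
    split_ifs at hA with hmem hclose
    apply hclose
    rw [List.any_eq_true]
    refine ⟨fig, hfig, ?_⟩
    rw [List.any_eq_true]
    exact ⟨ec, hec, by simp [h1, h2]⟩
  · -- (x, y) ∉ blocked → A's body true
    rw [Bool.not_eq_true'] at hA
    have hnb : ∀ fig ∈ existing_figures, ∀ ec ∈ fig,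
        ¬(|x - ec.1| ≤ 1 ∧ |y - ec.2| ≤ 1) := by
      intro fig hfig ec hec hd
      have hm : ((x, y) : Int × Int) ∈ pvBlocked existing_figures :=
        (pv_mem_blocked existing_figures (x, y)).mpr ⟨fig, hfig, ec, hec, hd.1, hd.2⟩
      rw [← PySem.Set.contains_iff] at hm
      exact Bool.false_ne_true (hA ▸ hm)
    dsimp only
    split_ifs with hmem hclose
    · exfalso
      rw [List.any_eq_true] at hmem
      obtain ⟨fig, hfig, hc⟩ := hmem
      rw [List.contains_iff_mem] at hc
      exact hnb fig hfig (x, y) hc (by simp)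
    · exfalso
      rw [List.any_eq_true] at hclose
      obtain ⟨fig, hfig, hc⟩ := hclose
      rw [List.any_eq_true] at hc
      obtain ⟨ec, hec, hd⟩ := hc
      simp only [Bool.and_eq_true, decide_eq_true_eq] at hd
      exact hnb fig hfig ec hec hd
    · rfl
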